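-- pv_equiv track=rewrite | github.com/avs-shivhare/Sheet_Solution | Interesting Patterns/Interesting_Patterns.py | interestingPattern
-- ===== SOURCE A (Python) =====
-- def interestingPattern(n):
--     ans = []
--
--     for i in range(n, 0, -1):
--         temp = ""
--         for j in range(n, 0, -1):
--             if j >= i:
--                 temp += str(j)
--             else:
--                 temp += str(i)
--         tt = temp
--         temp = tt[:-1] + temp[::-1]
--         ans.append(temp)
--
--     for i in range(2, n + 1):
--         temp = ""
--         for j in range(n, 0, -1):
--             if j >= i:
--                 temp += str(j)
--             else:
--                 temp += str(i)
--         tt = temp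
--         temp = tt[:-1] + temp[::-1]
--         ans.append(temp)
--
--     s = "";
--     for i in ans:
--         s += i+"\n"
--     return s
-- ===== SOURCE B (Python) =====
-- def interestingPattern(n):
--     rows = []
--     for i in range(1, n + 1):
--         fwd = ''.join(str(x) for x in range(n, i - 1, -1)) + str(i) * (i - 1)
--         rows.append(fwd[:-1] + fwd[::-1])
--     order = list(range(n, 0, -1)) + list(range(2, n + 1))
--     return ''.join(rows[i - 1] + '\n' for i in order)
-- ===== Notes on version B (the rewrite author's own statement) =====
-- stated objective: simpler
-- what changed: Each distinct row is built once in closed form (countdown digits joined + str(i) repeated i-1 times) into a table of n rows, and the output is assembled by indexing that table in the down-then-up order, replacing A's two duplicated nested loops that rebuild every row character-by-character with a per-character branch. (each row computed once instead of twice, no per-character branch)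
import Mathlib
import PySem

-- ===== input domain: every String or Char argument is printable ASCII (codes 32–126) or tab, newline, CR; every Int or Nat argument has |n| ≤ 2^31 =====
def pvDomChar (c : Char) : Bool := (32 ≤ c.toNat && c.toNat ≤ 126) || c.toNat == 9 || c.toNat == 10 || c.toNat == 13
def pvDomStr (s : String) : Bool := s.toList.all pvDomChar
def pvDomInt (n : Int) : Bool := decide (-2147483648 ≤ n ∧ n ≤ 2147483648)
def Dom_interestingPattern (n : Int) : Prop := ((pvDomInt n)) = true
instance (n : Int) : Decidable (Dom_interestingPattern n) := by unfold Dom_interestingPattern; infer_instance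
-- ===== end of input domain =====

-- B precomputes each distinct row once (closed-form: countdown digits + repeated str(i)) into a table
-- and assembles the output by indexing it, instead of A's duplicated nested branch-per-character loops; objective: simpler.

-- ===== PORT A =====
-- inner loop building temp, then temp = tt[:-1] + temp[::-1]  (s[::-1] ported as reverse, exact per PySem.List.slice?_none_none_neg_one)
def pvRowA (n i : Int) : List Char :=
  let temp := (PySem.List.pyRange n 0 (-1)).foldl
    (fun temp j => if j ≥ i then temp ++ PySem.Int.toChars j else temp ++ PySem.Int.toChars i) []
  let tt := temp
  PySem.List.slice tt none (some (-1)) ++ temp.reverse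

def interestingPattern (n : Int) : String :=
  let ans : List (List Char) :=
    (PySem.List.pyRange n 0 (-1)).foldl (fun ans i => ans ++ [pvRowA n i]) []
  let ans :=
    (PySem.List.pyRange 2 (n+1) 1).foldl (fun ans i => ans ++ [pvRowA n i]) ans
  String.ofList (ans.foldl (fun s r => s ++ r ++ ['\n']) [])

-- ===== PORT B =====
-- fwd = ''.join(str(x) for x in range(n, i-1, -1)) + str(i)*(i-1); row = fwd[:-1] + fwd[::-1]
def pvRowB (n i : Int) : List Char :=
  let fwd := ((PySem.List.pyRange n (i-1) (-1)).map PySem.Int.toChars).flatten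
             ++ PySem.List.pyRepeat (PySem.Int.toChars i) (i-1)
  PySem.List.slice fwd none (some (-1)) ++ fwd.reverse

def interestingPattern_alt (n : Int) : String :=
  let rows := (PySem.List.pyRange 1 (n+1) 1).map (pvRowB n)
  let order := PySem.List.pyRange n 0 (-1) ++ PySem.List.pyRange 2 (n+1) 1
  -- rows[i-1]: the index is always in range for i in order (keys 1..n), so pyGetD's default is never used
  String.ofList ((order.map (fun i => PySem.List.pyGetD rows (i-1) [] ++ ['\n'])).flatten)

-- ===== PRECONDITION & SPEC =====
def Spec_interestingPattern (n : Int) (out : String) : Prop := out = interestingPattern_alt n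
instance (n : Int) (out : String) : Decidable (Spec_interestingPattern n out) := by unfold Spec_interestingPattern; infer_instance

-- ===== CLAIM (what is proved, stated in full; the proofs are below) =====
def Claim_equal_interestingPattern : Prop := ∀ (n : Int), Dom_interestingPattern n → Spec_interestingPattern n (interestingPattern n)

-- ===== LEMMAS AND PROOFS =====

-- split the countdown range at i-1 (used by pvRow_eq)
theorem pvSplit_range (n i : Int) (h1 : 1 ≤ i) (h2 : i ≤ n) :
    PySem.List.pyRange n 0 (-1) = PySem.List.pyRange n (i-1) (-1) ++ PySem.List.pyRange (i-1) 0 (-1) := by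
  rw [PySem.List.pyRange_neg_one_eq_reverse, PySem.List.pyRange_neg_one_eq_reverse,
      PySem.List.pyRange_neg_one_eq_reverse]
  norm_num
  exact PySem.List.pyRange_one_append 1 i (n+1) (by omega) (by omega)

-- A's inner character loop equals B's closed-form fwd string, for 1 ≤ i ≤ n.
theorem pvRow_eq (n i : Int) (h1 : 1 ≤ i) (h2 : i ≤ n) : pvRowA n i = pvRowB n i := by
  have htemp : (PySem.List.pyRange n 0 (-1)).foldl
      (fun temp j => if j ≥ i then temp ++ PySem.Int.toChars j else temp ++ PySem.Int.toChars i) [] =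
      ((PySem.List.pyRange n (i-1) (-1)).map PySem.Int.toChars).flatten
      ++ PySem.List.pyRepeat (PySem.Int.toChars i) (i-1) := by
    have hf : (fun (temp : List Char) (j : Int) =>
        if j ≥ i then temp ++ PySem.Int.toChars j else temp ++ PySem.Int.toChars i)
        = fun temp j => temp ++ (if j ≥ i then PySem.Int.toChars j else PySem.Int.toChars i) := by
      funext t j; split <;> rfl
    rw [hf, PySem.List.foldl_append_eq_flatMap, List.nil_append]
    rw [pvSplit_range n i h1 h2, List.flatMap_append, List.flatMap_def, List.flatMap_def]
    congr 1
    · congr 1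
      apply List.map_eq_map_iff.mpr; intro j hj
      rw [PySem.List.mem_pyRange_neg_one] at hj
      rw [if_pos (by omega)]
    · have hmap : (PySem.List.pyRange (i-1) 0 (-1)).map
          (fun j => if j ≥ i then PySem.Int.toChars j else PySem.Int.toChars i)
          = (PySem.List.pyRange (i-1) 0 (-1)).map (fun _ => PySem.Int.toChars i) := by
        apply List.map_eq_map_iff.mpr; intro j hj
        rw [PySem.List.mem_pyRange_neg_one] at hj
        rw [if_neg (by omega)]
      rw [hmap, List.map_const', PySem.List.length_pyRange_neg_one]
      simp [PySem.List.pyRepeat]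
  unfold pvRowA pvRowB
  simp only [htemp]

-- table lookup: rows[i-1] = pvRowB n i for 1 ≤ i ≤ n
theorem pvLookup (n i : Int) (h1 : 1 ≤ i) (h2 : i ≤ n) :
    PySem.List.pyGetD ((PySem.List.pyRange 1 (n+1) 1).map (pvRowB n)) (i-1) [] = pvRowB n i := by
  rw [show i - 1 = (((i-1).toNat : Nat) : Int) by omega]
  rw [PySem.List.pyGetD_map_pyRange_one (pvRowB n) 1 (n+1) (i-1).toNat [] (by omega)]
  congr 1
  omega

-- ===== VERDICT (by name: the statement is the Claim_ definition above) =====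
theorem interestingPattern_spec : Claim_equal_interestingPattern := by
  intro n _
  unfold Spec_interestingPattern interestingPattern interestingPattern_alt
  simp only [PySem.List.foldl_append_singleton_eq_map, List.nil_append, ← List.map_append]
  have hf2 : (fun (s r : List Char) => s ++ r ++ ['\n']) = fun s r => s ++ (r ++ ['\n']) := by
    funext s r; rw [List.append_assoc]
  rw [hf2, PySem.List.foldl_append_eq_flatMap, List.nil_append, List.flatMap_def, List.map_map]
  congr 1
  congr 1
  apply List.map_eq_map_iff.mpr
  intro i hi
  have hib : 1 ≤ i ∧ i ≤ n := by
    rcases List.mem_append.mp hi with h | h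
    · rw [PySem.List.mem_pyRange_neg_one] at h; omega
    · rw [PySem.List.mem_pyRange_one] at h; omega
  simp only [Function.comp_def]
  rw [pvLookup n i hib.1 hib.2, pvRow_eq n i hib.1 hib.2]
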